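-- pv_equiv track=rewrite | github.com/gavinbees/text-to-image | lettertonumber.py | string_to_numbers
-- ===== SOURCE A (Python) =====
-- def string_to_numbers(original):
--     s = "" #alphanumeric string
--     n = "" #numberfied string
--     for x in original.lower():
--         if x.isalpha():
--             s+=x
--     for i in range(len(s)):
--         val = ord(s[i]) - 96 #makes a = 1, b = 2 etc
--         n = n + str(val)
--     while len(n) % 9 !=0:
--         n = n[:-1]
--     return n
-- ===== SOURCE B (Python) =====
-- def string_to_numbers(original):
--     digits = [str(ord(c) - 96) for c in original.lower() if c.isalpha()]
--     total = sum(len(d) for d in digits)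
--     budget = total - total % 9
--     out = []
--     for d in digits:
--         if budget == 0:
--             break
--         piece = d if len(d) <= budget else d[:budget]
--         out.append(piece)
--         budget -= len(piece)
--     return "".join(out)
-- ===== Notes on version B (the rewrite author's own statement) =====
-- stated objective: alternative
-- what changed: B precomputes each letter's digit string and the total digit count, derives the kept length up front (total - total % 9), and emits pieces under a decreasing budget with an early break that cuts the last piece, instead of A's build-the-whole-string-then-trim-one-char-at-a-time loop.
import Mathlib
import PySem

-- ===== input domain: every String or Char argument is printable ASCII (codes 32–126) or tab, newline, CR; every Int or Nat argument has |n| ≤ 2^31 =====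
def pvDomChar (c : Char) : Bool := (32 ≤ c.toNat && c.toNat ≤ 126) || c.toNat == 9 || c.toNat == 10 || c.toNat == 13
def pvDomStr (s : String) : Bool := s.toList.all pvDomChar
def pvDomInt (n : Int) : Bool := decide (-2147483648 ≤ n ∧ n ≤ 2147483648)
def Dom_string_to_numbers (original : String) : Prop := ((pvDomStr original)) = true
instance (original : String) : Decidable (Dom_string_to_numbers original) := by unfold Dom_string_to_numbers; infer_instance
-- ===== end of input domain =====

-- B precomputes each letter's digit string and the total digit count, derives the kept
-- length up front, and emits pieces under a decreasing budget with an early break,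
-- instead of A's build-everything-then-trim-char-by-char (objective: alternative).

-- ===== PORT A =====
-- 'while len(n) % 9 != 0: n = n[:-1]' (n[:-1] = dropLast, also for the empty string)
def pvTrimA (n : List Char) : List Char :=
  if n.length % 9 ≠ 0 then pvTrimA n.dropLast else n
termination_by n.length
decreasing_by simp [List.length_dropLast]; omega

def string_to_numbers (original : String) : String :=
  let s : List Char := (PySem.Chars.lower original.toList).foldl
    (fun acc x => if PySem.Chars.isalpha x then acc ++ [x] else acc) []
  let n : List Char := (PySem.List.pyRange 0 (PySem.List.len s) 1).foldl
    (fun acc i => acc ++ PySem.Int.toChars (((PySem.List.pyGetD s i ' ').toNat : Int) - 96)) []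
  String.mk (pvTrimA n)

-- ===== PORT B =====
-- the for-loop with 'if budget == 0: break'; budget is provably ≥ 0 in Source B, so it is a
-- Nat here and 'd[:budget]' (a nonnegative slice) is 'd.take budget'
def pvEmit (ds : List (List Char)) (budget : Nat) : List Char :=
  match ds with
  | [] => []
  | d :: rest =>
    if budget = 0 then []
    else
      let piece := if d.length ≤ budget then d else d.take budget
      piece ++ pvEmit rest (budget - piece.length)

def string_to_numbers_alt (original : String) : String :=
  let digits : List (List Char) := ((PySem.Chars.lower original.toList).filter
    PySem.Chars.isalpha).map (fun c => PySem.Int.toChars ((c.toNat : Int) - 96))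
  let total : Int := (digits.map (fun d => PySem.List.len d)).sum
  let budget : Int := total - PySem.Int.mod total 9
  String.mk (pvEmit digits budget.toNat)

-- ===== PRECONDITION & SPEC =====
def Spec_string_to_numbers (original : String) (out : String) : Prop := out = string_to_numbers_alt original
instance (original : String) (out : String) : Decidable (Spec_string_to_numbers original out) := by unfold Spec_string_to_numbers; infer_instance

-- ===== CLAIM (what is proved, stated in full; the proofs are below) =====
def Claim_equal_string_to_numbers : Prop := ∀ (original : String), Dom_string_to_numbers original → Spec_string_to_numbers original (string_to_numbers original)

-- ===== LEMMAS AND PROOFS =====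

-- A's trim loop equals truncation to the largest multiple of 9
lemma pvTrimA_eq_take (n : List Char) : pvTrimA n = n.take (n.length / 9 * 9) := by
  fun_induction pvTrimA n with
  | case1 n h ih =>
    rw [ih, List.dropLast_eq_take, List.take_take]
    congr 1
    simp only [List.length_take]
    omega
  | case2 n h =>
    have : n.length / 9 * 9 = n.length := by omega
    rw [this, List.take_length]

-- B's budget-limited emission is the b-prefix of the concatenation
lemma pvEmit_eq_take (ds : List (List Char)) (b : Nat) :
    pvEmit ds b = ds.flatten.take b := by
  induction ds generalizing b with
  | nil => simp [pvEmit]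
  | cons d rest ih =>
    simp only [pvEmit, List.flatten_cons]
    by_cases hb : b = 0
    · simp [hb]
    · simp only [hb, ite_false]
      by_cases hd : d.length ≤ b
      · simp only [hd, if_pos, ih, List.take_append, List.take_of_length_le hd]
      · have hlen : (d.take b).length = b := by
          simp only [List.length_take]; omega
        simp only [hd, ite_false, hlen, Nat.sub_self]
        rw [ih, List.take_append]
        have : b - d.length = 0 := by omega
        simp [this]

theorem string_to_numbers_spec : Claim_equal_string_to_numbers := by
  intro original _
  simp only [Spec_string_to_numbers, string_to_numbers, string_to_numbers_alt,
    PySem.List.foldl_append_if_eq_filter, List.nil_append, pvTrimA_eq_take, pvEmit_eq_take]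
  rw [PySem.List.foldl_pyRange_zero_pyGetD _ ' '
    (fun acc v => acc ++ PySem.Int.toChars ((v.toNat : Int) - 96)) []]
  rw [PySem.List.foldl_append_eq_flatMap]
  simp only [List.nil_append, List.flatten_eq_flatMap, List.flatMap_map, id_eq]
  congr 1
  have hlen : ∀ (cs : List Char),
      ((cs.map (fun c => PySem.Int.toChars ((c.toNat : Int) - 96))).map
        (fun d => PySem.List.len d)).sum = ((cs.flatMap (fun c => PySem.Int.toChars ((c.toNat : Int) - 96))).length : Int) := by
    intro cs
    induction cs with
    | nil => simp
    | cons c cs ih =>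
        simp only [List.map_cons, List.flatMap_cons, List.sum_cons, List.length_append,
          PySem.List.len] at ih ⊢
        push_cast at ih ⊢
        omega
  rw [hlen]
  set L := ((PySem.Chars.lower original.toList).filter PySem.Chars.isalpha).flatMap
    (fun c => PySem.Int.toChars ((c.toNat : Int) - 96)) with hL
  have hmod : PySem.Int.mod (L.length : Int) 9 = (L.length : Int) % 9 := by
    simp [PySem.Int.mod, Int.fmod_eq_emod]
  rw [hmod]
  have key : ((L.length : Int) - (L.length : Int) % 9).toNat = L.length / 9 * 9 := by
    omega
  rw [key]
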